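-- pv_equiv track=rewrite | github.com/zzh2529463628/AutoSteper | src/autosteper/cage.py | name2seq
-- ===== SOURCE A (Python) =====
-- def name2seq(name: str, cage_size: int):
--     seq = str()
--     addon_set = set()
--     bin_str = format(int(name, 36), 'b')
--     bin_str = '0' * (cage_size - len(bin_str)) + bin_str
--     for idx, a_position in enumerate(bin_str):
--         if a_position == '1':
--             seq += str(idx) + ' '
--             addon_set.add(idx)
--     return seq, addon_set
-- ===== SOURCE B (Python) =====
-- def name2seq(name: str, cage_size: int):
--     value = int(name, 36)
--     L = max(cage_size, len(format(value, 'b')))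
--     n = abs(value)
--     idxs = []
--     p = 0
--     while n:
--         if n & 1:
--             idxs.append(L - 1 - p)
--         n >>= 1
--         p += 1
--     idxs.reverse()
--     seq = ''.join(str(i) + ' ' for i in idxs)
--     return seq, set(idxs)
-- ===== Notes on version B (the rewrite author's own statement) =====
-- stated objective: alternative
-- what changed: B converts the name to an integer once and collects bit positions by iterating only over the value's bits with shift/mask arithmetic (idx = L-1-p for each set bit p, then one reverse), instead of materializing the zero-padded binary string and scanning it character by character.
import Mathlib
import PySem

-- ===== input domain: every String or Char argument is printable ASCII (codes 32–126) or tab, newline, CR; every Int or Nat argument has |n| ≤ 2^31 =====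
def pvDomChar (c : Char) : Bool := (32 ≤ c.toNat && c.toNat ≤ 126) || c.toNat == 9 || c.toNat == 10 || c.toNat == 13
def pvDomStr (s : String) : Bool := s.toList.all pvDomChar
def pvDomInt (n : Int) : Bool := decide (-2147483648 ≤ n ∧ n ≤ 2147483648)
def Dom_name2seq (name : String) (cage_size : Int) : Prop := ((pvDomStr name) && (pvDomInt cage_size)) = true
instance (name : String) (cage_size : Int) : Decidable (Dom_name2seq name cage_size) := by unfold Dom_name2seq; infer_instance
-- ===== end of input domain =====

-- B re-implements name2seq by iterating over the set bits of int(name, 36) with shift/mask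
-- arithmetic instead of building and scanning the zero-padded binary string (alternative
-- decomposition; equal return value).

-- ===== PORT A =====
def name2seq (name : String) (cage_size : Int) : String × List Int :=
  match PySem.Int.ofStrBase? name 36 with
  | none => ("", [])   -- int(name, 36) raises ValueError here; excluded by Pre_name2seq
  | some v =>
    let binStr := PySem.Int.toBinChars v
    -- '0' * (cage_size - len(bin_str)) + bin_str : a negative repeat count is the empty string
    let padded := List.replicate (cage_size - (binStr.length : Int)).toNat '0' ++ binStr
    let r := (PySem.List.enumerate padded 0).foldl
      (fun (st : List Char × PySem.Set Int) x =>
        if x.2 = '1' then (st.1 ++ PySem.Int.toChars x.1 ++ [' '], PySem.Set.add st.2 x.1) else st)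
      ([], PySem.Set.empty)
    (String.ofList r.1, r.2)

-- ===== PORT B =====
-- the 'while n: if n & 1: idxs.append(L - 1 - p); n >>= 1; p += 1' loop of Source B
def collectBits (n : Nat) (L p : Int) (acc : List Int) : List Int :=
  if h : n = 0 then acc
  else collectBits (n >>> 1) L (p + 1) (if n &&& 1 = 1 then acc ++ [L - 1 - p] else acc)
decreasing_by
  simp only [Nat.shiftRight_one]
  exact Nat.div_lt_self (Nat.pos_of_ne_zero h) one_lt_two

def name2seq_alt (name : String) (cage_size : Int) : String × List Int :=
  match PySem.Int.ofStrBase? name 36 with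
  | none => ("", [])   -- int(name, 36) raises ValueError here; excluded by Pre_name2seq
  | some v =>
    let L := max cage_size ((PySem.Int.toBinChars v).length : Int)
    let idxs := (collectBits v.natAbs L 0 []).reverse
    (String.ofList (PySem.Chars.join [] (idxs.map (fun i => PySem.Int.toChars i ++ [' ']))),
     PySem.Set.ofList idxs)

-- ===== PRECONDITION & SPEC =====
-- Pre_ excludes exactly the inputs where int(name, 36) raises ValueError (both A and B raise there).
def Pre_name2seq (name : String) (cage_size : Int) : Prop :=
  (PySem.Int.ofStrBase? name 36).isSome = true
instance (name : String) (cage_size : Int) : Decidable (Pre_name2seq name cage_size) := by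
  unfold Pre_name2seq; infer_instance
def pvWitness_name2seq : String × Int := ("z", 6)

def Spec_name2seq (name : String) (cage_size : Int) (out : String × List Int) : Prop := out = name2seq_alt name cage_size
instance (name : String) (cage_size : Int) (out : String × List Int) : Decidable (Spec_name2seq name cage_size out) := by unfold Spec_name2seq; infer_instance

-- ===== CLAIM (what is proved, stated in full; the proofs are below) =====
def Claim_equal_name2seq : Prop := ∀ (name : String) (cage_size : Int), Dom_name2seq name cage_size → Pre_name2seq name cage_size → Spec_name2seq name cage_size (name2seq name cage_size)

-- ===== LEMMAS AND PROOFS =====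

-- binary digit string of n (MSB first), the shape of Nat.toDigits 2
def binRep (n : Nat) : List Char :=
  if n < 2 then [Nat.digitChar n] else binRep (n / 2) ++ [Nat.digitChar (n % 2)]
decreasing_by exact Nat.div_lt_self (by omega) one_lt_two

-- ascending positions of the set bits of n
def lowBits (n : Nat) : List Nat :=
  if n = 0 then [] else (if n % 2 = 1 then [0] else []) ++ (lowBits (n / 2)).map (· + 1)
decreasing_by exact Nat.div_lt_self (by omega) one_lt_two

lemma toDigitsCore_two_eq (f : Nat) : ∀ (n : Nat) (acc : List Char), n < f →
    Nat.toDigitsCore 2 f n acc = binRep n ++ acc := by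
  induction f with
  | zero => intro n acc h; omega
  | succ f ih =>
    intro n acc h
    simp only [Nat.toDigitsCore]
    by_cases h2 : n / 2 = 0
    · have hlt : n < 2 := by omega
      rw [binRep, if_pos hlt, Nat.mod_eq_of_lt hlt]
      simp [h2]
    · rw [if_neg h2, binRep, if_neg (show ¬ n < 2 by omega), ih (n / 2) _ (by omega)]
      simp [List.append_assoc]

lemma toDigits_two_eq (n : Nat) : Nat.toDigits 2 n = binRep n := by
  simpa using toDigitsCore_two_eq (n + 1) n [] (by omega)

lemma lemmaB (n : Nat) : ∀ (L p : Int) (acc : List Int),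
    collectBits n L p acc = acc ++ (lowBits n).map (fun (q : Nat) => L - 1 - (p + (q : Int))) := by
  induction n using Nat.strong_induction_on with
  | _ n ih =>
    intro L p acc
    rw [collectBits, lowBits]
    by_cases h : n = 0
    · simp [h]
    · rw [dif_neg h, if_neg h, Nat.shiftRight_one, Nat.and_one_is_mod,
        ih (n / 2) (Nat.div_lt_self (by omega) one_lt_two)]
      have hmapped : ((lowBits (n / 2)).map (· + 1)).map (fun (q : Nat) => L - 1 - (p + (q : Int)))
          = (lowBits (n / 2)).map (fun (q : Nat) => L - 1 - (p + 1 + (q : Int))) := by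
        rw [List.map_map]
        apply List.map_congr_left
        intro a _
        simp only [Function.comp_apply]
        push_cast
        ring
      rcases Nat.mod_two_eq_zero_or_one n with h2 | h2
      · rw [h2, if_neg (by decide), if_neg (by decide), List.nil_append, hmapped]
      · rw [h2, if_pos rfl, if_pos rfl, List.map_append, hmapped]
        simp [List.append_assoc]

lemma filter_enumerate_replicate (k : Nat) (s : Int) :
    (PySem.List.enumerate (List.replicate k '0') s).filter (fun x => decide (x.2 = '1')) = [] := by
  rw [List.filter_eq_nil_iff]
  intro x hx
  rw [PySem.List.mem_enumerate_iff] at hx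
  obtain ⟨j, hj, rfl⟩ := hx
  simp

lemma enumerate_singleton (c : Char) (s : Int) :
    PySem.List.enumerate [c] s = [(s, c)] := by
  rw [PySem.List.enumerate_cons, PySem.List.enumerate_nil]

lemma lemmaA (n : Nat) : ∀ (s : Int),
    ((PySem.List.enumerate (binRep n) s).filter (fun x => decide (x.2 = '1'))).map (·.1)
      = (lowBits n).reverse.map (fun (q : Nat) => s + ((binRep n).length : Int) - 1 - (q : Int)) := by
  induction n using Nat.strong_induction_on with
  | _ n ih =>
    intro s
    have d0 : Nat.digitChar 0 = '0' := rfl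
    have d1 : Nat.digitChar 1 = '1' := rfl
    by_cases hlt : n < 2
    · interval_cases n
      · rw [binRep, lowBits]
        simp [enumerate_singleton, d0]
      · rw [binRep, lowBits, lowBits]
        simp [enumerate_singleton, d1]
    · rw [binRep, if_neg hlt, lowBits, if_neg (show ¬ n = 0 by omega),
        PySem.List.enumerate_append, List.filter_append, List.map_append,
        ih (n / 2) (Nat.div_lt_self (by omega) one_lt_two) s, enumerate_singleton]
      have hlen : (binRep (n / 2) ++ [Nat.digitChar (n % 2)]).length
          = (binRep (n / 2)).length + 1 := by simp
      simp only [hlen]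
      have hmapped : ((lowBits (n / 2)).map (· + 1)).reverse.map
            (fun (q : Nat) => s + (((binRep (n / 2)).length + 1 : Nat) : Int) - 1 - (q : Int))
          = (lowBits (n / 2)).reverse.map
            (fun (q : Nat) => s + (((binRep (n / 2)).length : Nat) : Int) - 1 - (q : Int)) := by
        rw [← List.map_reverse, List.map_map]
        apply List.map_congr_left
        intro a _
        simp only [Function.comp_apply]
        push_cast
        ring
      rcases Nat.mod_two_eq_zero_or_one n with h2 | h2
      · rw [h2, d0]
        rw [if_neg (by decide), List.nil_append]
        rw [show List.filter (fun x => decide (x.2 = '1'))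
              [((s + ((binRep (n / 2)).length : Int)), '0')] = [] from by simp]
        rw [List.map_nil, List.append_nil, hmapped]
      · rw [h2, d1]
        rw [if_pos rfl]
        rw [show List.filter (fun x => decide (x.2 = '1'))
              [((s + ((binRep (n / 2)).length : Int)), '1')]
            = [((s + ((binRep (n / 2)).length : Int)), '1')] from by simp]
        rw [List.reverse_append, List.map_append, hmapped]
        simp
        push_cast
        ring

lemma lemmaFold (l : List (Int × Char)) (cs : List Char) (st : PySem.Set Int) :
    l.foldl
      (fun (st : List Char × PySem.Set Int) x =>
        if x.2 = '1' then (st.1 ++ PySem.Int.toChars x.1 ++ [' '], PySem.Set.add st.2 x.1) else st)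
      (cs, st)
    = (cs ++ (((l.filter (fun x => decide (x.2 = '1'))).map (·.1)).map
          (fun i => PySem.Int.toChars i ++ [' '])).flatten,
       ((l.filter (fun x => decide (x.2 = '1'))).map (·.1)).foldl PySem.Set.add st) := by
  induction l generalizing cs st with
  | nil => simp
  | cons a l ih =>
    simp only [List.foldl_cons, List.filter_cons]
    by_cases h : a.2 = '1'
    · simp only [h, if_pos, decide_true]
      rw [ih]
      simp [List.append_assoc]
    · simp only [if_neg h, decide_eq_true_eq, h, decide_false]
      rw [ih]
      simp

lemma join_nil_eq_flatten (parts : List (List Char)) :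
    PySem.Chars.join [] parts = parts.flatten := by
  induction parts with
  | nil => rw [PySem.Chars.join_nil]; rfl
  | cons a t ih =>
    cases t with
    | nil => rw [PySem.Chars.join_singleton]; simp
    | cons b t2 =>
      rw [PySem.Chars.join_cons_cons, ih]
      simp

lemma filter_dash (s : Int) (l : List (Int × Char)) :
    ((s, '-') :: l).filter (fun x => decide (x.2 = '1'))
      = l.filter (fun x => decide (x.2 = '1')) := by
  simp

lemma pair_eq (idx1 idx2 : List Int) (h : idx1 = idx2) :
    (String.ofList ([] ++ (idx1.map (fun i => PySem.Int.toChars i ++ [' '])).flatten),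
      List.foldl PySem.Set.add PySem.Set.empty idx1)
    = (String.ofList ((idx2.map (fun i => PySem.Int.toChars i ++ [' '])).flatten),
      PySem.Set.ofList idx2) := by
  subst h
  rw [PySem.Set.ofList_eq_foldl]
  simp

-- ===== VERDICT (by name: the statement is the Claim_ definition above) =====
theorem name2seq_spec : Claim_equal_name2seq := by
  intro name cage_size _ hpre
  unfold Spec_name2seq name2seq name2seq_alt
  cases hof : PySem.Int.ofStrBase? name 36 with
  | none =>
    exfalso
    unfold Pre_name2seq at hpre
    rw [hof] at hpre
    simp at hpre
  | some v =>
    have hbin : PySem.Int.toBinChars v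
        = if v < 0 then '-' :: binRep v.natAbs else binRep v.toNat := by
      rw [PySem.Int.toBinChars, toDigits_two_eq, toDigits_two_eq]
    dsimp only
    rw [hbin, join_nil_eq_flatten, lemmaFold]
    apply pair_eq
    rw [lemmaB, List.nil_append, ← List.map_reverse]
    by_cases hv : v < 0
    · rw [if_pos hv, PySem.List.enumerate_append, List.filter_append, List.map_append,
        filter_enumerate_replicate, List.map_nil, List.nil_append, PySem.List.enumerate_cons,
        filter_dash, lemmaA]
      apply List.map_congr_left
      intro a _
      simp only [List.length_replicate, List.length_cons]
      push_cast
      omega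
    · rw [if_neg hv, PySem.List.enumerate_append, List.filter_append, List.map_append,
        filter_enumerate_replicate, List.map_nil, List.nil_append, lemmaA]
      have hnat : v.natAbs = v.toNat := by omega
      rw [hnat]
      apply List.map_congr_left
      intro a _
      simp only [List.length_replicate]
      push_cast
      omega
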